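-- pv_equiv track=rewrite | github.com/UoA-eResearch/bones | python_scripts/packages/cmiss.py | sort_derivatives
-- ===== SOURCE A (Python) =====
-- def sort_derivatives(keys):
--     sorted_keys = []
--     for k in keys:
--         sorted_keys.append("".join([s for s in k if s.isdigit()]))
--     sorted_keys = sorted(sorted_keys)
--
--     d = {}
--     for k in sorted_keys:
--         if len(k) not in d:
--             d[len(k)] = []
--         d[len(k)].append(k)
--
--     derivatives = []
--     try:
--         derivatives.append(d[1][0])
--         derivatives.append(d[1][1])
--         derivatives.append(d[2][0])
--         derivatives.append(d[1][2])
--         derivatives.append(d[2][1])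
--         derivatives.append(d[2][2])
--         derivatives.append(d[3][0])
--     except:
--         pass
--
--     return derivatives
-- ===== SOURCE B (Python) =====
-- def sort_derivatives(keys):
--     # Single pass, no sort, no dict: keep only the 3 smallest digit-strings of
--     # length 1 and 2 and the smallest of length 3 via bounded ordered insertion.
--     a, b, c = [], [], []
--     for k in keys:
--         s = "".join(ch for ch in k if ch.isdigit())
--         if len(s) == 1:
--             t = a
--         elif len(s) == 2:
--             t = b
--         elif len(s) == 3:
--             t = c
--         else:
--             continue
--         i = 0
--         while i < len(t) and t[i] <= s:
--             i += 1
--         t.insert(i, s)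
--         del t[3:]
--     out = []
--     for t, i in ((a, 0), (a, 1), (b, 0), (a, 2), (b, 1), (b, 2), (c, 0)):
--         if i >= len(t):
--             break
--         out.append(t[i])
--     return out
-- ===== Notes on version B (the rewrite author's own statement) =====
-- stated objective: alternative
-- what changed: A sorts all extracted digit-strings and buckets them into a dict before the exception-controlled picks; B never sorts or builds a dict: one pass keeps only the 3 smallest length-1 and length-2 digit-strings and the smallest length-3 one by bounded ordered insertion (O(1) state), then emits the picks with an early break.
import Mathlib
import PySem

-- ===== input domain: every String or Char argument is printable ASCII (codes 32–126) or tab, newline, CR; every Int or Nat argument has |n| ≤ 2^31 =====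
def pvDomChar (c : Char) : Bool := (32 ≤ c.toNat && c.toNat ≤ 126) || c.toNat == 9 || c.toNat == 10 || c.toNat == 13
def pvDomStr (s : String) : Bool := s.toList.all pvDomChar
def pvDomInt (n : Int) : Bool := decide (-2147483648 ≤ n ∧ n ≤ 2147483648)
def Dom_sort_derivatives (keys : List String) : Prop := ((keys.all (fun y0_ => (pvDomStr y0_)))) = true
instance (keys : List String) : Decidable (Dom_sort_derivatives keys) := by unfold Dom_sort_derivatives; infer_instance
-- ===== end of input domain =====

-- B replaces A's sort + dict bucketing + exception-controlled appends by a single pass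
-- keeping only the few smallest digit-strings of each needed length (objective: alternative).

-- digit extraction: "".join([s for s in k if s.isdigit()]) — the join of the filtered
-- single chars is exactly the string of the filtered char list (exact, per-char comprehension)
def pvDigits (k : String) : String := String.ofList (k.toList.filter (fun c => PySem.Chars.isdigit c))

-- ===== PORT A =====
-- loop body: if len(k) not in d: d[len(k)] = [];  d[len(k)].append(k)
-- (the append is the write d[L] = d[L] + [k]; after the guard the key L is present, getD [] reads d[L])
def pvStepA (d : PySem.Dict Int (List String)) (k : String) : PySem.Dict Int (List String) :=
  let L := PySem.Str.len k
  let d1 := if d.contains L then d else d.insert L []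
  d1.insert L (d1.getD L [] ++ [k])

def sort_derivatives (keys : List String) : List String :=
  let sorted_keys := keys.foldl (fun acc k => acc ++ [pvDigits k]) []
  let sorted_keys := PySem.List.sorted sorted_keys (fun x => x) false
  let d := sorted_keys.foldl pvStepA PySem.Dict.empty
  let derivatives : List String := []
  -- try: derivatives.append(d[1][0]); … ; except: pass — each step stops on KeyError/IndexError (none)
  match (d.get? 1).bind (fun l => PySem.List.pyGet? l 0) with
  | none => derivatives
  | some v0 =>
    let derivatives := derivatives ++ [v0]
    match (d.get? 1).bind (fun l => PySem.List.pyGet? l 1) with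
    | none => derivatives
    | some v1 =>
      let derivatives := derivatives ++ [v1]
      match (d.get? 2).bind (fun l => PySem.List.pyGet? l 0) with
      | none => derivatives
      | some v2 =>
        let derivatives := derivatives ++ [v2]
        match (d.get? 1).bind (fun l => PySem.List.pyGet? l 2) with
        | none => derivatives
        | some v3 =>
          let derivatives := derivatives ++ [v3]
          match (d.get? 2).bind (fun l => PySem.List.pyGet? l 1) with
          | none => derivatives
          | some v4 =>
            let derivatives := derivatives ++ [v4]
            match (d.get? 2).bind (fun l => PySem.List.pyGet? l 2) with
            | none => derivatives
            | some v5 =>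
              let derivatives := derivatives ++ [v5]
              match (d.get? 3).bind (fun l => PySem.List.pyGet? l 0) with
              | none => derivatives
              | some v6 => derivatives ++ [v6]

-- ===== PORT B =====
-- the inner while/insert/del: find the first index with t[i] > s, insert s there, keep 3
def pvInsert : List String → String → List String
  | [], s => [s]
  | x :: xs, s => if x ≤ s then x :: pvInsert xs s else s :: x :: xs

def pvInsCap (t : List String) (s : String) : List String := (pvInsert t s).take 3

-- the loop body: extract digits, route to the bucket of its length (or skip), bounded insert
def pvStepB (st : List String × List String × List String) (k : String) :
    List String × List String × List String :=
  let s := pvDigits k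
  if PySem.Str.len s == 1 then (pvInsCap st.1 s, st.2.1, st.2.2)
  else if PySem.Str.len s == 2 then (st.1, pvInsCap st.2.1 s, st.2.2)
  else if PySem.Str.len s == 3 then (st.1, st.2.1, pvInsCap st.2.2 s)
  else st

-- for t, i in (...): if i >= len(t): break; out.append(t[i])
def pvSel : List (List String × Nat) → List String
  | [] => []
  | (t, i) :: rest =>
    match t[i]? with
    | none => []
    | some v => v :: pvSel rest

def sort_derivatives_alt (keys : List String) : List String :=
  let st := keys.foldl pvStepB ([], [], [])
  pvSel [(st.1, 0), (st.1, 1), (st.2.1, 0), (st.1, 2), (st.2.1, 1), (st.2.1, 2), (st.2.2, 0)]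

-- ===== PRECONDITION & SPEC =====
def Spec_sort_derivatives (keys : List String) (out : List String) : Prop := out = sort_derivatives_alt keys
instance (keys : List String) (out : List String) : Decidable (Spec_sort_derivatives keys out) := by unfold Spec_sort_derivatives; infer_instance

-- ===== CLAIM (what is proved, stated in full; the proofs are below) =====
def Claim_equal_sort_derivatives : Prop := ∀ (keys : List String), Dom_sort_derivatives keys → Spec_sort_derivatives keys (sort_derivatives keys)

-- ===== LEMMAS AND PROOFS =====

-- ---------- A side: the dict after the bucketing loop ----------

theorem pvContains_eq_isSome (d : PySem.Dict Int (List String)) (L : Int) :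
    d.contains L = (d.get? L).isSome := by
  rcases h : d.get? L with _ | v
  · simp [(PySem.Dict.get?_eq_none_iff_contains d L).mp h]
  · cases hc : d.contains L
    · have := (PySem.Dict.get?_eq_none_iff_contains d L).mpr hc
      simp [this] at h
    · simp

-- one step of A's dict loop, seen through get?
theorem pvStepA_get? (d : PySem.Dict Int (List String)) (k : String) (L : Int) :
    (pvStepA d k).get? L =
      if L = PySem.Str.len k then some (d.getD L [] ++ [k]) else d.get? L := by
  show (let L := PySem.Str.len k;
        let d1 := if d.contains L = true then d else d.insert L [];
        d1.insert L (d1.getD L [] ++ [k])).get? L = _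
  simp only []
  by_cases hc : d.contains (PySem.Str.len k)
  · simp only [hc, if_true, PySem.Dict.get?_insert]
    split_ifs with h
    · rw [h]
    · rfl
  · by_cases hL : L = PySem.Str.len k
    · subst hL
      rw [PySem.Dict.get?_insert_self, if_neg hc, PySem.Dict.getD_insert_self, if_pos rfl,
        PySem.Dict.getD_of_not_contains d [] (by simpa using hc)]
    · rw [if_neg hc, PySem.Dict.get?_insert_of_ne _ _ hL, PySem.Dict.get?_insert_of_ne _ _ hL,
        if_neg hL]

theorem pvStepA_contains (d : PySem.Dict Int (List String)) (k : String) (L : Int) :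
    (pvStepA d k).contains L = (decide (L = PySem.Str.len k) || d.contains L) := by
  rw [pvContains_eq_isSome, pvStepA_get?, pvContains_eq_isSome]
  by_cases hL : L = PySem.Str.len k
  · rw [if_pos hL, decide_eq_true hL]
    simp
  · rw [if_neg hL, decide_eq_false hL]
    simp

theorem pvStepA_getD (d : PySem.Dict Int (List String)) (k : String) (L : Int) :
    (pvStepA d k).getD L [] =
      if L = PySem.Str.len k then d.getD L [] ++ [k] else d.getD L [] := by
  rw [PySem.Dict.getD_eq_get?_getD, pvStepA_get?]
  split_ifs with hL
  · simp
  · rw [← PySem.Dict.getD_eq_get?_getD]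

-- A's dict after folding over sk: bucket L is present iff some element has length L,
-- and then holds exactly the length-L elements of sk in order
theorem pvFold_get? (sk : List String) (d : PySem.Dict Int (List String)) (L : Int) :
    (sk.foldl pvStepA d).get? L =
      if d.contains L = true ∨ (sk.any fun s => PySem.Str.len s == L) = true then
        some (d.getD L [] ++ sk.filter (fun s => PySem.Str.len s == L))
      else none := by
  induction sk generalizing d with
  | nil =>
    simp only [List.foldl_nil, List.any_nil, List.filter_nil, List.append_nil]
    by_cases hc : d.contains L
    · rcases h : d.get? L with _ | v
      · exact absurd ((PySem.Dict.get?_eq_none_iff_contains d L).mp h) (by simp [hc])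
      · rw [PySem.Dict.getD_of_get?_eq_some d [] h]
        simp [hc]
    · have h : d.get? L = none :=
        (PySem.Dict.get?_eq_none_iff_contains d L).mpr (by simpa using hc)
      simp [hc, h]
  | cons k sk ih =>
    rw [List.foldl_cons, ih (pvStepA d k), pvStepA_contains, pvStepA_getD]
    by_cases hL : L = PySem.Str.len k
    · have hb : (PySem.Str.len k == L) = true := by simp [hL]
      simp [hL]
    · have hb : (PySem.Str.len k == L) = false := by
        simp only [beq_eq_false_iff_ne, ne_eq]
        intro h; exact hL h.symm
      have hL2 : ¬ ((k.length : Int) = L) := fun h => hL (by simp [← h])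
      simp only [List.filter_cons, List.any_cons, hb, Bool.false_or, if_neg hL]
      have hL3 : ¬ L = ((k.length : Nat) : Int) := fun h => hL2 h.symm
      simp [hL3]

-- corollary for the empty initial dict: each try-block read is a bucket lookup
theorem pvRead_eq (sk : List String) (L i : Int) (hi : 0 ≤ i) :
    ((sk.foldl pvStepA PySem.Dict.empty).get? L).bind (fun l => PySem.List.pyGet? l i) =
      (sk.filter (fun s => PySem.Str.len s == L))[i.toNat]? := by
  rw [pvFold_get?]
  simp only [PySem.Dict.contains_empty, PySem.Dict.getD_empty, Bool.false_eq_true, false_or,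
    List.nil_append]
  by_cases h : (sk.any fun s => PySem.Str.len s == L) = true
  · rw [if_pos h]
    simp only [Option.bind_some]
    exact PySem.List.pyGet?_of_nonneg _ hi
  · have hnil : sk.filter (fun s => PySem.Str.len s == L) = [] := by
      rw [List.filter_eq_nil_iff]
      intro x hx hc
      exact h (List.any_eq_true.mpr ⟨x, hx, hc⟩)
    rw [if_neg h, hnil]
    simp

-- ---------- B side: the bounded insertion pass keeps take 3 of the sorted bucket ----------

theorem pvInsert_perm (l : List String) (s : String) : (pvInsert l s).Perm (s :: l) := by
  induction l with
  | nil => simp [pvInsert]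
  | cons x xs ih =>
    simp only [pvInsert]
    split_ifs with hx
    · exact (ih.cons x).trans (List.Perm.swap s x xs)
    · exact List.Perm.refl _

theorem pvInsert_pairwise (l : List String) (s : String) (h : l.Pairwise (· ≤ ·)) :
    (pvInsert l s).Pairwise (· ≤ ·) := by
  induction l with
  | nil => simp [pvInsert]
  | cons x xs ih =>
    rw [List.pairwise_cons] at h
    simp only [pvInsert]
    split_ifs with hx
    · refine List.pairwise_cons.mpr ⟨?_, ih h.2⟩
      intro y hy
      rcases List.mem_cons.mp ((pvInsert_perm xs s).mem_iff.mp hy) with rfl | hy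
      · exact hx
      · exact h.1 y hy
    · refine List.pairwise_cons.mpr ⟨?_, List.pairwise_cons.mpr h⟩
      intro y hy
      rcases List.mem_cons.mp hy with rfl | hy
      · exact Std.le_of_not_ge hx
      · exact (Std.le_of_not_ge hx).trans (h.1 y hy)

theorem pvIsort_perm (xs : List String) : ∀ l : List String, (xs.foldl pvInsert l).Perm (l ++ xs) := by
  induction xs with
  | nil => intro l; simp
  | cons s xs ih =>
    intro l
    rw [List.foldl_cons]
    exact ((ih (pvInsert l s)).trans
      (((pvInsert_perm l s).append_right xs).trans (List.perm_middle).symm)).trans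
      (by simp)

theorem pvIsort_pairwise (xs : List String) :
    ∀ l : List String, l.Pairwise (· ≤ ·) → (xs.foldl pvInsert l).Pairwise (· ≤ ·) := by
  induction xs with
  | nil => intro l h; simpa using h
  | cons s xs ih =>
    intro l h
    rw [List.foldl_cons]
    exact ih _ (pvInsert_pairwise l s h)

-- the bounded insert only ever needs the first n elements
theorem pvInsert_take (l : List String) (s : String) (n : Nat) :
    (pvInsert (l.take n) s).take n = (pvInsert l s).take n := by
  induction l generalizing n with
  | nil => simp
  | cons x xs ih =>
    cases n with
    | zero => simp
    | succ m =>
      simp only [List.take_succ_cons, pvInsert]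
      split_ifs with hx
      · simp only [List.take_succ_cons, ih m]
      · simp only [List.take_succ_cons]
        congr 1
        rw [← List.take_succ_cons, List.take_take]
        simp

theorem pvFoldCap (xs : List String) :
    ∀ l : List String, xs.foldl pvInsCap (l.take 3) = (xs.foldl pvInsert l).take 3 := by
  induction xs with
  | nil => intro l; simp
  | cons s xs ih =>
    intro l
    simp only [List.foldl_cons, pvInsCap]
    rw [pvInsert_take]
    exact ih (pvInsert l s)

-- the insertion pass over a bucket equals the filtered global sort
theorem pvIsort_eq_filter_sorted (digs : List String) (p : String → Bool) :
    (digs.filter p).foldl pvInsert [] = (PySem.List.sorted digs (fun x => x) false).filter p := by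
  have h1 : (PySem.List.sorted (digs.filter p) (fun x => x) false) =
      (digs.filter p).foldl pvInsert [] :=
    PySem.List.sorted_id_eq_of_perm_of_pairwise _ _
      (by simpa using pvIsort_perm (digs.filter p) [])
      (pvIsort_pairwise (digs.filter p) [] (by simp))
  have h2 : (PySem.List.sorted (digs.filter p) (fun x => x) false) =
      (PySem.List.sorted digs (fun x => x) false).filter p :=
    PySem.List.sorted_id_eq_of_perm_of_pairwise _ _
      (List.Perm.filter p (PySem.List.sorted_perm digs (fun x => x) false))
      (List.Pairwise.filter p (by simpa using PySem.List.sorted_pairwise digs (fun x => x)))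
  rw [← h1, h2]

-- ---------- splitting B's single fold into three independent bucket passes ----------

-- proof-side view of one bucket's update
def pvF (p : String → Bool) (t : List String) (k : String) : List String :=
  if p (pvDigits k) then pvInsCap t (pvDigits k) else t

theorem pvStepB_eq (st : List String × List String × List String) (k : String) :
    pvStepB st k =
      (pvF (fun s => PySem.Str.len s == 1) st.1 k,
       pvF (fun s => PySem.Str.len s == 2) st.2.1 k,
       pvF (fun s => PySem.Str.len s == 3) st.2.2 k) := by
  simp only [pvStepB, pvF, PySem.Str.len_eq, beq_iff_eq]
  split_ifs <;> first | rfl | (exfalso; omega)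

theorem pvFoldB_split (keys : List String) :
    ∀ st : List String × List String × List String,
      keys.foldl pvStepB st =
        (keys.foldl (pvF (fun s => PySem.Str.len s == 1)) st.1,
         keys.foldl (pvF (fun s => PySem.Str.len s == 2)) st.2.1,
         keys.foldl (pvF (fun s => PySem.Str.len s == 3)) st.2.2) := by
  induction keys with
  | nil => intro st; rfl
  | cons k keys ih =>
    intro st
    simp only [List.foldl_cons, pvStepB_eq]
    exact ih _

-- skipping the non-matching keys is folding over the filtered digit-strings
theorem pvFoldF_eq (p : String → Bool) (keys : List String) :
    ∀ t : List String,
      keys.foldl (pvF p) t = ((keys.map pvDigits).filter p).foldl pvInsCap t := by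
  induction keys with
  | nil => intro t; rfl
  | cons k keys ih =>
    intro t
    simp only [List.foldl_cons, List.map_cons, List.filter_cons, pvF]
    split_ifs with h
    · simp only [List.foldl_cons]
      exact ih _
    · exact ih t

-- one bucket of B = take 3 of the corresponding filtered sorted bucket of A
theorem pvBucketB (keys : List String) (p : String → Bool) :
    keys.foldl (pvF p) [] =
      ((PySem.List.sorted (keys.map pvDigits) (fun x => x) false).filter p).take 3 := by
  rw [pvFoldF_eq]
  have h : ((keys.map pvDigits).filter p).foldl pvInsCap ([] : List String) =
      (((keys.map pvDigits).filter p).foldl pvInsert []).take 3 := by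
    have := pvFoldCap ((keys.map pvDigits).filter p) []
    simpa using this
  rw [h, pvIsort_eq_filter_sorted]

-- ---------- the two selection shapes agree on take-3 buckets ----------

theorem pvChain7 (b : Int → List String) :
    (match (b 1)[0]? with
     | none => ([] : List String)
     | some v0 =>
       match (b 1)[1]? with
       | none => [] ++ [v0]
       | some v1 =>
         match (b 2)[0]? with
         | none => [] ++ [v0] ++ [v1]
         | some v2 =>
           match (b 1)[2]? with
           | none => [] ++ [v0] ++ [v1] ++ [v2]
           | some v3 =>
             match (b 2)[1]? with
             | none => [] ++ [v0] ++ [v1] ++ [v2] ++ [v3]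
             | some v4 =>
               match (b 2)[2]? with
               | none => [] ++ [v0] ++ [v1] ++ [v2] ++ [v3] ++ [v4]
               | some v5 =>
                 match (b 3)[0]? with
                 | none => [] ++ [v0] ++ [v1] ++ [v2] ++ [v3] ++ [v4] ++ [v5]
                 | some v6 => [] ++ [v0] ++ [v1] ++ [v2] ++ [v3] ++ [v4] ++ [v5] ++ [v6]) =
      pvSel [((b 1).take 3, 0), ((b 1).take 3, 1), ((b 2).take 3, 0), ((b 1).take 3, 2),
             ((b 2).take 3, 1), ((b 2).take 3, 2), ((b 3).take 3, 0)] := by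
  have e : ∀ (l : List String) (i : Nat), i < 3 → (l.take 3)[i]? = l[i]? :=
    fun l i h => List.getElem?_take_of_lt h
  simp only [pvSel, e _ 0 (by norm_num), e _ 1 (by norm_num), e _ 2 (by norm_num)]
  cases (b 1)[0]? <;> cases (b 1)[1]? <;> cases (b 2)[0]? <;> cases (b 1)[2]? <;>
    cases (b 2)[1]? <;> cases (b 2)[2]? <;> cases (b 3)[0]? <;> rfl

-- ===== VERDICT (by name: the statement is the Claim_ definition above) =====
set_option maxHeartbeats 1000000 in
theorem sort_derivatives_spec : Claim_equal_sort_derivatives := by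
  intro keys _
  unfold Spec_sort_derivatives
  simp only [sort_derivatives, sort_derivatives_alt]
  rw [PySem.List.foldl_append_singleton_eq_map, List.nil_append]
  have h10 := pvRead_eq (PySem.List.sorted (keys.map pvDigits) (fun x => x) false) 1 0 (by norm_num)
  have h11 := pvRead_eq (PySem.List.sorted (keys.map pvDigits) (fun x => x) false) 1 1 (by norm_num)
  have h20 := pvRead_eq (PySem.List.sorted (keys.map pvDigits) (fun x => x) false) 2 0 (by norm_num)
  have h12 := pvRead_eq (PySem.List.sorted (keys.map pvDigits) (fun x => x) false) 1 2 (by norm_num)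
  have h21 := pvRead_eq (PySem.List.sorted (keys.map pvDigits) (fun x => x) false) 2 1 (by norm_num)
  have h22 := pvRead_eq (PySem.List.sorted (keys.map pvDigits) (fun x => x) false) 2 2 (by norm_num)
  have h30 := pvRead_eq (PySem.List.sorted (keys.map pvDigits) (fun x => x) false) 3 0 (by norm_num)
  norm_num at h10 h11 h20 h12 h21 h22 h30
  rw [h10, h11, h20, h12, h21, h22, h30]
  rw [pvFoldB_split]
  simp only [pvBucketB]
  exact pvChain7 (fun L => (PySem.List.sorted (keys.map pvDigits) (fun x => x) false).filter
    (fun s => PySem.Str.len s == L))
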